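-- pv_equiv track=rewrite | github.com/MattClarke873/AdventOfCode | AoC_2023/2023_Day_3/main.py | find_part_number
-- ===== SOURCE A (Python) =====
-- def find_part_number(grid, digit_hit):
--     start_points = set()
--     for row, col in digit_hit:
--         # move left until the start of the number
--         start = col
--         while start > 0 and grid[row][start - 1].isdigit():
--             start -= 1
--         start_points.add((row,start))
--     return (sorted(start_points))
-- ===== SOURCE B (Python) =====
-- def find_part_number(grid, digit_hit):
--     # One pass per relevant row builds a (row, col) -> run-start table; each hit
--     # is then a single O(1) lookup instead of a leftward scan.  Hits with
--     # col <= 0 need no scan at all, so their rows are never indexed and the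
--     # lookup default keeps the raw column.
--     index = {}
--     for row in {r for r, c in digit_hit if c > 0}:
--         line = grid[row]
--         index[(row, 0)] = 0
--         for j in range(1, len(line) + 1):
--             index[(row, j)] = index[(row, j - 1)] if line[j - 1].isdigit() else j
--     return sorted({(row, index.get((row, col), col)) for row, col in digit_hit})
-- ===== Notes on version B (the rewrite author's own statement) =====
-- stated objective: alternative
-- what changed: Replaces the per-hit leftward while-scan with a single left-to-right pass per relevant row that builds a (row,col)->run-start table, so each hit becomes one dictionary lookup.
import Mathlib
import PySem

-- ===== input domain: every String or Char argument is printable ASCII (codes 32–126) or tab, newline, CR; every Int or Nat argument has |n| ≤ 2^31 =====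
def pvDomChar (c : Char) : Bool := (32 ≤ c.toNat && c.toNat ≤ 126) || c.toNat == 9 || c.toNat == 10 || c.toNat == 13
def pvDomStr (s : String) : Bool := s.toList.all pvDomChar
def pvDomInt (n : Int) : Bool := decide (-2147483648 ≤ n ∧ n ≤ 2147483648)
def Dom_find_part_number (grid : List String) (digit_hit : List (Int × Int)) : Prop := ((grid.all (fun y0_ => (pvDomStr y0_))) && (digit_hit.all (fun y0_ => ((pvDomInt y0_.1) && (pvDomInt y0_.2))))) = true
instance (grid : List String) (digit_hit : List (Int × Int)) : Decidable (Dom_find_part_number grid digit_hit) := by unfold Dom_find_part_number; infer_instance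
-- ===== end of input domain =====

-- B replaces A's per-hit leftward while-scan by one left-to-right pass per distinct row building a
-- (row,col) -> run-start table, then a single lookup per hit (objective: alternative algorithm).

-- ===== PORT A =====
-- grid[row] as a char list (negative rows wrap, like Python; default "" is never used inside Pre_)
def pvLineOf (grid : List String) (r : Int) : List Char := ((PySem.List.pyGet? grid r).getD "").toList

-- 'while start > 0 and grid[row][start-1].isdigit(): start -= 1'; fuel = start.toNat bounds the loop
-- (the default ' ' for an out-of-range char is non-digit; inside Pre_ every probed index is in range)
def pvWalkA (line : List Char) (start : Int) : Nat → Int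
  | 0 => start
  | f+1 =>
    if 0 < start ∧ PySem.Chars.isdigit ((PySem.List.pyGet? line (start - 1)).getD ' ') = true then
      pvWalkA line (start - 1) f
    else start

def find_part_number (grid : List String) (digit_hit : List (Int × Int)) : List (Int × Int) :=
  let pts := digit_hit.foldl
    (fun (s : PySem.Set (Int × Int)) rc =>
      PySem.Set.add s (rc.1, pvWalkA (pvLineOf grid rc.1) rc.2 rc.2.toNat))
    PySem.Set.empty
  PySem.List.sorted2 pts (fun p => p.1) (fun p => p.2)

-- ===== PORT B =====
-- body of 'for j in range(1, len(line)+1): index[(row,j)] = index[(row,j-1)] if line[j-1].isdigit() else j'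
-- (the Python lookup index[(row,j-1)] can never miss, so getD 0 is exact)
def pvStep (line : List Char) (r : Int) (d : PySem.Dict (Int × Int) Int) (j : Int) : PySem.Dict (Int × Int) Int :=
  d.insert (r, j)
    (if PySem.Chars.isdigit ((PySem.List.pyGet? line (j - 1)).getD ' ') = true then d.getD (r, j - 1) 0 else j)

def pvBuildRow (idx : PySem.Dict (Int × Int) Int) (r : Int) (line : List Char) : PySem.Dict (Int × Int) Int :=
  (PySem.List.pyRange 1 ((line.length : Int) + 1) 1).foldl (pvStep line r) (idx.insert (r, 0) 0)

def find_part_number_alt (grid : List String) (digit_hit : List (Int × Int)) : List (Int × Int) :=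
  let idx := (PySem.Set.ofList ((digit_hit.filter (fun p => decide (0 < p.2))).map Prod.fst)).foldl
    (fun d r => pvBuildRow d r (pvLineOf grid r)) PySem.Dict.empty
  let pts := digit_hit.foldl
    (fun (s : PySem.Set (Int × Int)) rc =>
      PySem.Set.add s (rc.1, (PySem.Dict.get? idx (rc.1, rc.2)).getD rc.2))
    PySem.Set.empty
  PySem.List.sorted2 pts (fun p => p.1) (fun p => p.2)

-- ===== PRECONDITION & SPEC =====
-- Pre_ excludes exactly the inputs on which A raises IndexError: a hit with a positive column whose
-- row is out of range or whose column exceeds that row's length; every input A returns on is admitted.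
def Pre_find_part_number (grid : List String) (digit_hit : List (Int × Int)) : Prop :=
  ∀ p ∈ digit_hit, p.2 ≤ 0 ∨ (PySem.Raise.InRange grid.length p.1 ∧
    p.2 ≤ ((((PySem.List.pyGet? grid p.1).getD "").toList.length : Int)))
instance (grid : List String) (digit_hit : List (Int × Int)) : Decidable (Pre_find_part_number grid digit_hit) := by
  unfold Pre_find_part_number; infer_instance

def pvWitness_find_part_number : List String × (List (Int × Int)) :=
  (["12.", "..9"], [(0, 1), (1, 2), (0, 1)])

def Spec_find_part_number (grid : List String) (digit_hit : List (Int × Int)) (out : List (Int × Int)) : Prop := out = find_part_number_alt grid digit_hit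
instance (grid : List String) (digit_hit : List (Int × Int)) (out : List (Int × Int)) : Decidable (Spec_find_part_number grid digit_hit out) := by unfold Spec_find_part_number; infer_instance

-- ===== CLAIM (what is proved, stated in full; the proofs are below) =====
def Claim_equal_find_part_number : Prop := ∀ (grid : List String) (digit_hit : List (Int × Int)), Dom_find_part_number grid digit_hit → Pre_find_part_number grid digit_hit → Spec_find_part_number grid digit_hit (find_part_number grid digit_hit)

-- ===== LEMMAS AND PROOFS =====

-- the common characterisation: start of the digit run ending just before position c
def pvSpecStart (line : List Char) : Nat → Int
  | 0 => 0
  | c+1 =>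
    if PySem.Chars.isdigit ((PySem.List.pyGet? line (c : Int)).getD ' ') = true then pvSpecStart line c
    else ((c : Int) + 1)

lemma pvWalkA_eq (line : List Char) : ∀ (c fuel : Nat), c ≤ fuel →
    pvWalkA line (c : Int) fuel = pvSpecStart line c := by
  intro c
  induction c with
  | zero => intro fuel _; cases fuel <;> simp [pvWalkA, pvSpecStart]
  | succ c ih =>
    intro fuel hf
    cases fuel with
    | zero => omega
    | succ f =>
      have h1 : ((c + 1 : Nat) : Int) - 1 = (c : Int) := by push_cast; ring
      have h0 : (0 : Int) < ((c + 1 : Nat) : Int) := by positivity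
      by_cases hd : PySem.Chars.isdigit ((PySem.List.pyGet? line (c : Int)).getD ' ') = true
      · rw [pvWalkA, if_pos (by rw [h1]; exact ⟨h0, hd⟩), h1, ih f (by omega)]
        simp only [pvSpecStart]
        rw [if_pos hd]
      · rw [pvWalkA, if_neg (by rw [h1]; exact fun h => hd h.2)]
        simp only [pvSpecStart]
        rw [if_neg hd]
        push_cast
        ring

lemma pvBuild_inv (line : List Char) (r : Int) (idx : PySem.Dict (Int × Int) Int) (m : Nat) :
    (∀ c : Nat, c ≤ m →
      ((PySem.List.pyRange 1 ((m : Int) + 1) 1).foldl (pvStep line r) (idx.insert (r, 0) 0)).get? (r, (c : Int))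
        = some (pvSpecStart line c))
    ∧ (∀ k : Int × Int, (k.1 ≠ r ∨ k.2 < 0 ∨ (m : Int) < k.2) →
      ((PySem.List.pyRange 1 ((m : Int) + 1) 1).foldl (pvStep line r) (idx.insert (r, 0) 0)).get? k
        = idx.get? k) := by
  induction m with
  | zero =>
    rw [PySem.List.pyRange_one_eq_nil (by norm_num)]
    constructor
    · intro c hc
      interval_cases c
      simp [PySem.Dict.get?_insert_self, pvSpecStart]
    · intro k hk
      refine PySem.Dict.get?_insert_of_ne _ _ ?_
      intro he
      have h1' : k.1 = r := by rw [he]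
      have h2' : k.2 = 0 := by rw [he]
      rcases hk with h | h | h
      · exact h h1'
      · omega
      · omega
  | succ m ih =>
    have hcast : (((m + 1 : Nat) : Int) + 1) = ((m : Int) + 1) + 1 := by push_cast; ring
    rw [hcast, PySem.List.pyRange_one_succ_right (by omega), List.foldl_append]
    set F := (PySem.List.pyRange 1 ((m : Int) + 1) 1).foldl (pvStep line r) (idx.insert (r, 0) 0) with hF
    have hstepval : (F.getD (r, (m : Int)) 0) = pvSpecStart line m := by
      rw [PySem.Dict.getD_eq_get?_getD, ih.1 m (le_refl m)]; rfl
    have h1 : ((m : Int) + 1) - 1 = (m : Int) := by ring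
    constructor
    · intro c hc
      rcases Nat.lt_or_ge c (m + 1) with hlt | hge
      · -- c ≤ m : the key is untouched by the last step
        simp only [List.foldl, pvStep]
        rw [PySem.Dict.get?_insert_of_ne _ _ (by
          intro he
          have h2' : (c : Int) = (m : Int) + 1 := congrArg Prod.snd he
          omega)]
        exact ih.1 c (by omega)
      · have hcm : c = m + 1 := by omega
        subst hcm
        simp only [List.foldl, pvStep]
        have hc2 : ((m + 1 : Nat) : Int) = (m : Int) + 1 := by push_cast; ring
        rw [hc2, h1, PySem.Dict.get?_insert_self, hstepval]
        simp only [pvSpecStart]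
    · intro k hk
      simp only [List.foldl, pvStep]
      rw [PySem.Dict.get?_insert_of_ne _ _ (by
        intro he
        have h1' : k.1 = r := by rw [he]
        have h2' : k.2 = (m : Int) + 1 := by rw [he]
        rcases hk with h | h | h
        · exact h h1'
        · omega
        · omega)]
      refine ih.2 k ?_
      rcases hk with h | h | h
      · exact Or.inl h
      · exact Or.inr (Or.inl h)
      · exact Or.inr (Or.inr (by omega))

lemma pvBuildRow_get (idx : PySem.Dict (Int × Int) Int) (r : Int) (line : List Char)
    (c : Nat) (hc : c ≤ line.length) :
    (pvBuildRow idx r line).get? (r, (c : Int)) = some (pvSpecStart line c) :=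
  (pvBuild_inv line r idx line.length).1 c hc

lemma pvBuildRow_pres (idx : PySem.Dict (Int × Int) Int) (r : Int) (line : List Char)
    (k : Int × Int) (h : k.1 ≠ r) :
    (pvBuildRow idx r line).get? k = idx.get? k :=
  (pvBuild_inv line r idx line.length).2 k (Or.inl h)

lemma pvRowsFold_pres (grid : List String) (l : List Int) (d : PySem.Dict (Int × Int) Int)
    (k : Int × Int) (h : k.1 ∉ l) :
    (l.foldl (fun d r => pvBuildRow d r (pvLineOf grid r)) d).get? k = d.get? k := by
  induction l generalizing d with
  | nil => rfl
  | cons r0 t ih =>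
    simp only [List.foldl]
    rw [ih _ (fun hm => h (List.mem_cons_of_mem _ hm)),
      pvBuildRow_pres _ _ _ _ (fun he => h (he ▸ List.mem_cons_self))]

lemma pvRowsFold_get (grid : List String) (l : List Int) (d : PySem.Dict (Int × Int) Int)
    (r : Int) (hr : r ∈ l) (c : Nat) (hc : c ≤ (pvLineOf grid r).length) :
    (l.foldl (fun d r => pvBuildRow d r (pvLineOf grid r)) d).get? (r, (c : Int))
      = some (pvSpecStart (pvLineOf grid r) c) := by
  induction l generalizing d with
  | nil => cases hr
  | cons r0 t ih =>
    simp only [List.foldl]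
    by_cases ht : r ∈ t
    · exact ih _ ht
    · have hr0 : r = r0 := by
        rcases List.mem_cons.mp hr with h | h
        · exact h
        · exact absurd h ht
      subst hr0
      rw [pvRowsFold_pres grid t _ (r, (c : Int)) ht, pvBuildRow_get _ _ _ _ hc]

lemma pvBuildRow_pres_neg (idx : PySem.Dict (Int × Int) Int) (r : Int) (line : List Char)
    (k : Int × Int) (h : k.2 < 0) :
    (pvBuildRow idx r line).get? k = idx.get? k :=
  (pvBuild_inv line r idx line.length).2 k (Or.inr (Or.inl h))

lemma pvRowsFold_pres_neg (grid : List String) (l : List Int) (d : PySem.Dict (Int × Int) Int)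
    (k : Int × Int) (h : k.2 < 0) :
    (l.foldl (fun d r => pvBuildRow d r (pvLineOf grid r)) d).get? k = d.get? k := by
  induction l generalizing d with
  | nil => rfl
  | cons r0 t ih =>
    simp only [List.foldl]
    rw [ih _, pvBuildRow_pres_neg _ _ _ _ h]

lemma pvRowsFold_zero (grid : List String) (r : Int) :
    ∀ (l : List Int) (d : PySem.Dict (Int × Int) Int),
      (d.get? (r, 0) = none ∨ d.get? (r, 0) = some 0) →
      ((l.foldl (fun d r => pvBuildRow d r (pvLineOf grid r)) d).get? (r, 0) = none ∨
        (l.foldl (fun d r => pvBuildRow d r (pvLineOf grid r)) d).get? (r, 0) = some 0) := by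
  intro l
  induction l with
  | nil => intro d hd; exact hd
  | cons r0 t ih =>
    intro d hd
    simp only [List.foldl]
    apply ih
    by_cases hr : r = r0
    · subst hr
      right
      have h0 := pvBuildRow_get d r (pvLineOf grid r) 0 (Nat.zero_le _)
      simpa [pvSpecStart] using h0
    · rw [pvBuildRow_pres _ _ _ (r, 0) hr]
      exact hd

lemma pvFoldl_eq_of_mem {α β : Type} (l : List α) (f g : β → α → β)
    (h : ∀ x ∈ l, ∀ s, f s x = g s x) : ∀ s, l.foldl f s = l.foldl g s := by
  induction l with
  | nil => intro s; rfl
  | cons x t ih =>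
    intro s
    simp only [List.foldl]
    rw [h x List.mem_cons_self s]
    exact ih (fun y hy s => h y (List.mem_cons_of_mem _ hy) s) _

-- ===== VERDICT (by name: the statement is the Claim_ definition above) =====
theorem find_part_number_spec : Claim_equal_find_part_number := by
  intro grid digit_hit _hdom hpre
  unfold Pre_find_part_number at hpre
  unfold Spec_find_part_number find_part_number find_part_number_alt
  have key : ∀ rc ∈ digit_hit, ∀ s : PySem.Set (Int × Int),
      PySem.Set.add s (rc.1, pvWalkA (pvLineOf grid rc.1) rc.2 rc.2.toNat)
        = PySem.Set.add s (rc.1,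
            ((List.foldl (fun d r => pvBuildRow d r (pvLineOf grid r)) PySem.Dict.empty
              (PySem.Set.ofList ((digit_hit.filter (fun p => decide (0 < p.2))).map Prod.fst))).get?
                (rc.1, rc.2)).getD rc.2) := by
    intro rc hrc s
    by_cases hpos : 0 < rc.2
    · -- a real hit: both sides compute the run start for this row and column
      have hplen : rc.2 ≤ (((PySem.List.pyGet? grid rc.1).getD "").toList.length : Int) := by
        rcases hpre rc hrc with h | ⟨_, h⟩
        · omega
        · exact h
      have hc : ((rc.2.toNat : Nat) : Int) = rc.2 := Int.toNat_of_nonneg (le_of_lt hpos)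
      set c := rc.2.toNat with hcdef
      have hclen : c ≤ (pvLineOf grid rc.1).length := by
        have h' := hplen
        rw [← hc] at h'
        unfold pvLineOf
        exact_mod_cast h'
      have hmem : rc.1 ∈ PySem.Set.ofList ((digit_hit.filter (fun p => decide (0 < p.2))).map Prod.fst) :=
        (PySem.Set.mem_ofList _ _).mpr
          (List.mem_map.mpr ⟨rc, List.mem_filter.mpr ⟨hrc, by simpa using hpos⟩, rfl⟩)
      rw [← hc, pvWalkA_eq (pvLineOf grid rc.1) c c (le_refl c),
        pvRowsFold_get grid _ _ rc.1 hmem c hclen, Option.getD_some]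
    · -- col ≤ 0: A's while loop never runs and B's lookup yields the raw column back
      have hle : rc.2 ≤ 0 := by omega
      have hfuel : rc.2.toNat = 0 := Int.toNat_of_nonpos hle
      rw [hfuel]
      rcases lt_or_eq_of_le hle with hlt | heq
      · rw [pvRowsFold_pres_neg grid _ _ (rc.1, rc.2) hlt, PySem.Dict.get?_empty]
        rfl
      · rw [heq]
        rcases pvRowsFold_zero grid rc.1 _ PySem.Dict.empty (Or.inl (PySem.Dict.get?_empty _)) with h | h
        · rw [h]; rfl
        · rw [h]; rfl
  exact congrArg (fun l : PySem.Set (Int × Int) => PySem.List.sorted2 l (fun p => p.1) (fun p => p.2))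
    (pvFoldl_eq_of_mem digit_hit _ _ key PySem.Set.empty)
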